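-- pv_equiv track=rewrite | github.com/mat2ja/napredni-python | kol/K1/kol1.py | naj_ponavljanje
-- ===== SOURCE A (Python) =====
-- def naj_ponavljanje(redovi):
--     max_repeat = 1
--     for red in redovi:
--         local_repeat = 1
--         for i in range(1, len(red)):
--             if red[i-1] == red[i]:
--                 local_repeat += 1
--                 max_repeat = max(max_repeat, local_repeat)
--             else:
--                 local_repeat = 1
--
--     return max_repeat
-- ===== SOURCE B (Python) =====
-- def _run_lengths(red):
--     lens = []
--     prev = None
--     for x in red:
--         if lens and x == prev:
--             lens[-1] += 1
--         else:
--             lens.append(1)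
--         prev = x
--     return lens
--
-- def naj_ponavljanje(redovi):
--     return max([1] + [n for red in redovi for n in _run_lengths(red)])
-- ===== Notes on version B (the rewrite author's own statement) =====
-- stated objective: alternative
-- what changed: Replaces the nested index loop comparing red[i-1]==red[i] while tracking a running maximum with a run-length decomposition: each row is first grouped into maximal equal runs and the answer is the maximum of all run lengths seeded with 1.
import Mathlib
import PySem

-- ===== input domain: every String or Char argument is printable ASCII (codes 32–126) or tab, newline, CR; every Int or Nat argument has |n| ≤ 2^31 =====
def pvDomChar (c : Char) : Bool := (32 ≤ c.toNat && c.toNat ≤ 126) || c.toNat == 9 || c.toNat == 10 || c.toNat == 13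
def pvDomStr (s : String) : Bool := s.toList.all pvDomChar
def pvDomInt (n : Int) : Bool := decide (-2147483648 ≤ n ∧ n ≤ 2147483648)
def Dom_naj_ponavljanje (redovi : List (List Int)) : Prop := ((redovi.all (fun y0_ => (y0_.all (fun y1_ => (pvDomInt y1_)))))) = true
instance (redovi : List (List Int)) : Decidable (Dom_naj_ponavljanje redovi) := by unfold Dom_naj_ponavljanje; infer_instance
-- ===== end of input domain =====

-- B replaces A's index-pair scan carrying a running maximum with a per-row run-length decomposition followed by one global max (alternative decomposition, same cost).

-- ===== PORT A =====
def naj_ponavljanje (redovi : List (List Int)) : Int :=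
  redovi.foldl (fun max_repeat red =>
    ((PySem.List.pyRange 1 (red.length : Int) 1).foldl (fun (s : Int × Int) i =>
        if PySem.List.pyGet? red (i - 1) = PySem.List.pyGet? red i then
          (s.1 + 1, max s.2 (s.1 + 1))
        else
          (1, s.2)) (1, max_repeat)).2) 1

-- ===== PORT B =====
-- _run_lengths: lengths of the maximal consecutive-equal runs of red, built left to right
def runLens (red : List Int) : List Int :=
  (red.foldl (fun (s : List Int × Option Int) x =>
      if s.1 ≠ [] ∧ s.2 = some x then (s.1.dropLast ++ [s.1.getLastD 0 + 1], some x)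
      else (s.1 ++ [1], some x)) ([], none)).1

-- max([1] + [n for red in redovi for n in _run_lengths(red)])
def naj_ponavljanje_alt (redovi : List (List Int)) : Int :=
  (redovi.flatMap (fun red => runLens red)).foldl max 1

-- ===== PRECONDITION & SPEC =====
def Spec_naj_ponavljanje (redovi : List (List Int)) (out : Int) : Prop := out = naj_ponavljanje_alt redovi
instance (redovi : List (List Int)) (out : Int) : Decidable (Spec_naj_ponavljanje redovi out) := by unfold Spec_naj_ponavljanje; infer_instance

-- ===== CLAIM (what is proved, stated in full; the proofs are below) =====
def Claim_equal_naj_ponavljanje : Prop := ∀ (redovi : List (List Int)), Dom_naj_ponavljanje redovi → Spec_naj_ponavljanje redovi (naj_ponavljanje redovi)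

-- ===== LEMMAS AND PROOFS =====

-- Structural form of A's inner index loop: walk the suffix, carrying the previous element.
def pairScanA (prev loc maxr : Int) : List Int → Int
  | [] => maxr
  | y :: ys => if prev = y then pairScanA y (loc + 1) (max maxr (loc + 1)) ys
               else pairScanA y 1 maxr ys

-- A's index loop over red = pre ++ prev :: suf, started at index pre.length + 1, is pairScanA on suf.
lemma indexLoop_eq_pairScanA (suf : List Int) : ∀ (pre : List Int) (prev : Int) (s : Int × Int),
    ((PySem.List.pyRange ((pre.length : Int) + 1) ((pre.length : Int) + 1 + (suf.length : Int)) 1).foldl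
      (fun (s : Int × Int) i =>
        if PySem.List.pyGet? (pre ++ prev :: suf) (i - 1) = PySem.List.pyGet? (pre ++ prev :: suf) i then
          (s.1 + 1, max s.2 (s.1 + 1))
        else
          (1, s.2)) s).2 = pairScanA prev s.1 s.2 suf := by
  induction suf with
  | nil =>
    intro pre prev s
    rw [PySem.List.pyRange_one_eq_nil (by simp)]
    simp [pairScanA]
  | cons y ys ih =>
    intro pre prev s
    rw [PySem.List.pyRange_one_cons (by simp only [List.length_cons]; push_cast; omega),
        List.foldl_cons]
    have hg1 : PySem.List.pyGet? (pre ++ prev :: y :: ys) ((pre.length : Int) + 1 - 1) = some prev := by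
      have : ((pre.length : Int) + 1 - 1) = ((pre.length : Nat) : Int) := by ring
      rw [this, PySem.List.pyGet?_natCast]
      rw [List.getElem?_append_right (le_refl _)]
      simp
    have hg2 : PySem.List.pyGet? (pre ++ prev :: y :: ys) ((pre.length : Int) + 1) = some y := by
      have : ((pre.length : Int) + 1) = ((pre.length + 1 : Nat) : Int) := by push_cast; ring
      rw [this, PySem.List.pyGet?_natCast]
      rw [List.getElem?_append_right (by omega)]
      simp
    rw [hg1, hg2]
    have key := ih (pre ++ [prev]) y
    have hb1 : (((pre ++ [prev]).length : Int) + 1) = (pre.length : Int) + 1 + 1 := by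
      simp
    have hb2 : (((pre ++ [prev]).length : Int) + 1 + (ys.length : Int))
        = (pre.length : Int) + 1 + ((ys.length : Int) + 1) := by simp; omega
    have hl : (pre ++ [prev]) ++ y :: ys = pre ++ prev :: y :: ys := by simp
    rw [hb2, hb1, hl] at key
    simp only [pairScanA, Option.some.injEq, List.length_cons]
    push_cast
    by_cases hpy : prev = y
    · rw [if_pos hpy, if_pos hpy, key]
    · rw [if_neg hpy, if_neg hpy, key]

lemma dropLast_lastD {l : List Int} (h : l ≠ []) : l.dropLast ++ [l.getLastD 0] = l := by
  rw [List.getLastD_eq_getLast?, List.getLast?_eq_some_getLast h]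
  exact List.dropLast_concat_getLast h

-- B's fold continued from a non-empty lens whose last entry is loc, with maxr the max so far, matches pairScanA.
lemma pairScanA_eq_foldB (xs : List Int) : ∀ (prev : Int) (lens : List Int) (loc maxr m : Int),
    lens ≠ [] → lens.getLastD 0 = loc → maxr = lens.foldl max m → 1 ≤ m →
    pairScanA prev loc maxr xs =
      ((xs.foldl (fun (s : List Int × Option Int) x =>
          if s.1 ≠ [] ∧ s.2 = some x then (s.1.dropLast ++ [s.1.getLastD 0 + 1], some x)
          else (s.1 ++ [1], some x)) (lens, some prev)).1).foldl max m := by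
  induction xs with
  | nil => intro prev lens loc maxr m hne hlast hmax hm; simpa using hmax
  | cons x xs ih =>
    intro prev lens loc maxr m hne hlast hmax hm
    rw [List.getLastD_eq_getLast?] at hlast
    simp only [pairScanA, List.foldl_cons]
    by_cases hpx : prev = x
    · subst hpx
      rw [if_pos rfl, if_pos ⟨hne, rfl⟩]
      have hsplit : lens.dropLast ++ [lens.getLastD 0] = lens := dropLast_lastD hne
      have hlm : lens.foldl max m = max (lens.dropLast.foldl max m) loc := by
        conv_lhs => rw [← hsplit]
        simp [hlast]
      apply ih
      · simp
      · simp [hlast]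
      · have hr : ((lens.dropLast ++ [lens.getLastD 0 + 1]).foldl max m)
            = max (lens.dropLast.foldl max m) (loc + 1) := by
          simp [hlast]
        rw [hmax, hlm, hr]; omega
      · exact hm
    · rw [if_neg hpx, if_neg (fun h => hpx (Option.some.inj h.2))]
      apply ih
      · simp
      · simp
      · have h1 : m ≤ lens.foldl max m := (PySem.List.le_foldl_max lens m).1
        rw [hmax]; simp only [List.foldl_append, List.foldl_cons, List.foldl_nil]; omega
      · exact hm

-- Per row: A's inner loop result equals folding max over the row's run lengths.
lemma row_eq (red : List Int) (m : Int) (hm : 1 ≤ m) :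
    ((PySem.List.pyRange 1 (red.length : Int) 1).foldl (fun (s : Int × Int) i =>
        if PySem.List.pyGet? red (i - 1) = PySem.List.pyGet? red i then
          (s.1 + 1, max s.2 (s.1 + 1))
        else
          (1, s.2)) (1, m)).2 = (runLens red).foldl max m := by
  cases red with
  | nil =>
    rw [PySem.List.pyRange_one_eq_nil (by simp)]
    simp [runLens]
  | cons x xs =>
    have h := indexLoop_eq_pairScanA xs [] x (1, m)
    simp only [List.nil_append, List.length_nil, Nat.cast_zero, zero_add] at h
    have hb : ((x :: xs).length : Int) = 1 + (xs.length : Int) := by simp; omega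
    rw [hb]
    refine h.trans ?_
    have hstep : runLens (x :: xs)
        = ((xs.foldl (fun (s : List Int × Option Int) x =>
            if s.1 ≠ [] ∧ s.2 = some x then (s.1.dropLast ++ [s.1.getLastD 0 + 1], some x)
            else (s.1 ++ [1], some x)) ([1], some x)).1) := by
      unfold runLens
      simp
    rw [hstep]
    exact pairScanA_eq_foldB xs x [1] 1 m m (by simp) (by simp) (by simp; omega) hm

lemma outer_eq (rows : List (List Int)) : ∀ (m : Int), 1 ≤ m →
    rows.foldl (fun max_repeat red =>
      ((PySem.List.pyRange 1 (red.length : Int) 1).foldl (fun (s : Int × Int) i =>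
          if PySem.List.pyGet? red (i - 1) = PySem.List.pyGet? red i then
            (s.1 + 1, max s.2 (s.1 + 1))
          else
            (1, s.2)) (1, max_repeat)).2) m
    = (rows.flatMap (fun red => runLens red)).foldl max m := by
  induction rows with
  | nil => intro m _; simp
  | cons red rows ih =>
    intro m hm
    simp only [List.foldl_cons, List.flatMap_cons, List.foldl_append]
    rw [row_eq red m hm]
    exact ih _ (le_trans hm (PySem.List.le_foldl_max (runLens red) m).1)

-- ===== VERDICT (by name: the statement is the Claim_ definition above) =====
theorem naj_ponavljanje_spec : Claim_equal_naj_ponavljanje := by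
  intro redovi _
  unfold Spec_naj_ponavljanje naj_ponavljanje naj_ponavljanje_alt
  exact outer_eq redovi 1 le_rfl
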